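-- pv_equiv track=rewrite | github.com/OpenOmics/modr | workflow/scripts/annotate_flair.py | extract_9th_column_information
-- ===== SOURCE A (Python) =====
-- def clean(string):
--     """Cleans a string to remove double and single quotes."""
--     return string.replace('"', '').replace("'", '')
--
-- def extract_9th_column_information(key_value_line, values_to_extract):
--     """Given a string containing key/value information in
--     the 9th column in the GTF file, this will extract info
--     for a list of known values."""
--     kv_list = key_value_line.lstrip().rstrip().rstrip(';').split(';')
--     metadata = {attribute: '' for attribute in values_to_extract}
--     for kv in kv_list:
--         k,v = kv.lstrip().split(' ', maxsplit=1)
--         k = clean(k)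
--         if k in values_to_extract:
--             metadata[k] = v
--     return metadata
-- ===== SOURCE B (Python) =====
-- def clean(string):
--     """Cleans a string to remove double and single quotes."""
--     return string.replace('"', '').replace("'", '')
--
-- def extract_9th_column_information(key_value_line, values_to_extract):
--     """Parse all entries into a (key, value) pair list, then answer each
--     requested attribute by a backwards scan for its last occurrence."""
--     pairs = []
--     for kv in key_value_line.strip().rstrip(';').split(';'):
--         k, v = kv.lstrip().split(' ', 1)
--         pairs.append((clean(k), v))
--     result = {}
--     for attr in values_to_extract:
--         val = ''
--         for k, v in reversed(pairs):
--             if k == attr: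
--                 val = v
--                 break
--         result[attr] = val
--     return result
-- ===== Notes on version B (the rewrite author's own statement) =====
-- stated objective: alternative
-- what changed: B replaces A's single dict-updating pass (initialize requested keys, then filter each entry by membership) with parse-all-entries-into-a-pair-list and then, for each requested attribute, a backwards linear scan of that list for its last occurrence.
import Mathlib
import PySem

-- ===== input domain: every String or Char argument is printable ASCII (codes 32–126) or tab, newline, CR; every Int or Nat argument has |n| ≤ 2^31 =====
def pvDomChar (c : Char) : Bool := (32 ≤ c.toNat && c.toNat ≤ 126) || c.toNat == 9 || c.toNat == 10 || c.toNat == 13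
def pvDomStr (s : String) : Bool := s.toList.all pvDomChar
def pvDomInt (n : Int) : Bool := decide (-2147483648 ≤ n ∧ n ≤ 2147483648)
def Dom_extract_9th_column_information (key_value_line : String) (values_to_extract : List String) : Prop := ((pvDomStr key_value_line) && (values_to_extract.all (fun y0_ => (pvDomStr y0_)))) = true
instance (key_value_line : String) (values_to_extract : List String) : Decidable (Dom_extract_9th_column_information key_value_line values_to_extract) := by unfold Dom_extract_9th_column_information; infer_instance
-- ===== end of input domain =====

-- B parses every entry of the 9th column into a (key, value) pair list and then answers each
-- requested attribute by a backwards scan for its last occurrence, instead of A's single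
-- dict-updating filtered pass.

-- A's clean(string) = string.replace('"','').replace("'",'')
def pyCleanA (s : String) : String :=
  PySem.Str.replace (PySem.Str.replace s "\"" "") "'" ""

-- A's s.rstrip(';') — hand port (PySem has no one-sided strip-with-chars); exact:
-- drop trailing ';' characters.
def rstripSemisA (s : String) : String :=
  String.ofList ((s.toList.reverse.dropWhile (fun c => c == ';')).reverse)

-- B's clean(string) (B keeps the same helper in Source B)
def pyCleanB (s : String) : String :=
  PySem.Str.replace (PySem.Str.replace s "\"" "") "'" ""

-- B's s.rstrip(';') — hand port, exact as above
def rstripSemisB (s : String) : String :=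
  String.ofList ((s.toList.reverse.dropWhile (fun c => c == ';')).reverse)

-- ===== PORT A =====
-- ValueError (an entry that does not split into key and value) is excluded by Pre_; the
-- `| _ => d` branches are unreachable under Pre_.
def extract_9th_column_information (key_value_line : String) (values_to_extract : List String) : List (String × String) :=
  let kv_list := (PySem.Str.split? (rstripSemisA (PySem.Str.rstrip (PySem.Str.lstrip key_value_line))) ";").getD []
  let metadata := values_to_extract.foldl (fun d attrib => d.insert attrib "") PySem.Dict.empty
  (kv_list.foldl (fun d kv =>
      match PySem.Str.splitMax? (PySem.Str.lstrip kv) " " 1 with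
      | some [k, v] =>
          let k := pyCleanA k
          if k ∈ values_to_extract then d.insert k v else d
      | _ => d) metadata).items

-- ===== PORT B =====
-- Source B's inner `for k, v in reversed(pairs): if k == attr: val = v; break` loop, applied to
-- the reversed pair list.
def lastScanB : List (String × String) → String → String
  | [], _ => ""
  | (k, v) :: t, a => if k == a then v else lastScanB t a

def extract_9th_column_information_alt (key_value_line : String) (values_to_extract : List String) : List (String × String) :=
  let pairs := ((PySem.Str.split? (rstripSemisB (PySem.Str.strip key_value_line)) ";").getD []).foldl
      (fun ps kv =>
        match PySem.Str.splitMax? (PySem.Str.lstrip kv) " " 1 with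
        | none => ps
        | some l =>
          match l with
          | [] => ps
          | k :: rest =>
            match rest with
            | [] => ps
            | v :: _ => ps ++ [(pyCleanB k, v)]) []
  (values_to_extract.foldl (fun d attr => d.insert attr (lastScanB pairs.reverse attr)) PySem.Dict.empty).items

-- ===== PRECONDITION & SPEC =====
-- Pre_ holds exactly when every ';'-separated entry of the stripped 9th column splits (on the
-- first space, after lstrip) into a key and a value; on other inputs the Python A (and B alike)
-- raises ValueError at the tuple unpacking `k,v = ...`.
-- Pre_'s own copy of the rstrip(';') helper (kept separate from the ports' helpers)
def rstripSemisPre (s : String) : String :=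
  String.ofList ((s.toList.reverse.dropWhile (fun c => c == ';')).reverse)

def Pre_extract_9th_column_information (key_value_line : String) (values_to_extract : List String) : Prop :=
  ∀ kv ∈ (PySem.Str.split? (rstripSemisPre (PySem.Str.strip key_value_line)) ";").getD [],
    ((PySem.Str.splitMax? (PySem.Str.lstrip kv) " " 1).getD []).length = 2
instance (key_value_line : String) (values_to_extract : List String) : Decidable (Pre_extract_9th_column_information key_value_line values_to_extract) := by unfold Pre_extract_9th_column_information; infer_instance

def pvWitness_extract_9th_column_information : String × List String :=
  ("gene_id \"G1\"; transcript_id \"T1\";", ["gene_id", "transcript_id"])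

def Spec_extract_9th_column_information (key_value_line : String) (values_to_extract : List String) (out : List (String × String)) : Prop := out = extract_9th_column_information_alt key_value_line values_to_extract
instance (key_value_line : String) (values_to_extract : List String) (out : List (String × String)) : Decidable (Spec_extract_9th_column_information key_value_line values_to_extract out) := by unfold Spec_extract_9th_column_information; infer_instance

-- ===== CLAIM (what is proved, stated in full; the proofs are below) =====
def Claim_equal_extract_9th_column_information : Prop := ∀ (key_value_line : String) (values_to_extract : List String), Dom_extract_9th_column_information key_value_line values_to_extract → Pre_extract_9th_column_information key_value_line values_to_extract → Spec_extract_9th_column_information key_value_line values_to_extract (extract_9th_column_information key_value_line values_to_extract)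

-- ===== LEMMAS AND PROOFS =====

-- proof-side: the (key, value) pairs one entry contributes (one pair, or none for the
-- malformed entries Pre_ excludes)
def gPair (kv : String) : List (String × String) :=
  match PySem.Str.splitMax? (PySem.Str.lstrip kv) " " 1 with
  | some [k, v] => [(pyCleanB k, v)]
  | _ => []

-- `{attr: g(attr) for attr in values}` as a dict: lookup
lemma getD_foldl_insert_fun (values : List String) (g : String → String)
    (d : PySem.Dict String String) (x : String) (d0 : String) :
    (values.foldl (fun d a => d.insert a (g a)) d).getD x d0
      = if x ∈ values then g x else d.getD x d0 := by
  induction values generalizing d with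
  | nil => simp
  | cons a t ih =>
      simp only [List.foldl_cons, ih, PySem.Dict.getD_insert, List.mem_cons]
      by_cases hxt : x ∈ t <;> by_cases hxa : x = a <;> simp [hxt, hxa]

-- keys of such a comprehension dict
lemma keys_foldl_insert_fun (values : List String) (g : String → String) :
    (values.foldl (fun d a => d.insert a (g a)) PySem.Dict.empty).keys
      = PySem.Set.ofList values := by
  rw [PySem.Dict.keys_foldl_insert values (fun _ a => g a) PySem.Dict.empty,
      PySem.Dict.keys_empty, PySem.Set.update_nil_left]

-- overwriting a key that occurs in `values` = building the comprehension with the updated value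
lemma foldl_insert_fun_overwrite (values : List String) (g : String → String)
    (k v : String) (hk : k ∈ values) :
    values.foldl (fun d a => d.insert a (if a = k then v else g a)) PySem.Dict.empty
      = (values.foldl (fun d a => d.insert a (g a)) PySem.Dict.empty).insert k v := by
  have hkeysL := keys_foldl_insert_fun values (fun a => if a = k then v else g a)
  have hkeysR := keys_foldl_insert_fun values g
  have hcont : (values.foldl (fun d a => d.insert a (g a)) PySem.Dict.empty).contains k = true := by
    rw [PySem.Dict.contains_iff_mem_keys, hkeysR, PySem.Set.mem_ofList]; exact hk
  have hkeysR' := PySem.Dict.keys_insert_of_contains _ v hcont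
  apply PySem.Dict.ext
  rw [PySem.Dict.items_eq_map_keys _ (by rw [hkeysL]; exact PySem.Set.nodup_ofList values) "",
      PySem.Dict.items_eq_map_keys _ (by rw [hkeysR', hkeysR]; exact PySem.Set.nodup_ofList values) "",
      hkeysL, hkeysR', hkeysR]
  apply List.map_congr_left
  intro x hx
  rw [PySem.Set.mem_ofList] at hx
  rw [getD_foldl_insert_fun, PySem.Dict.getD_insert, getD_foldl_insert_fun]
  by_cases hxk : x = k <;> simp [hx, hxk, hk]

-- the selection commutes with one insert into the full dict
lemma sel_insert (values : List String) (f : PySem.Dict String String) (k v : String) :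
    values.foldl (fun d a => d.insert a ((f.insert k v).getD a "")) PySem.Dict.empty
      = (if k ∈ values
          then (values.foldl (fun d a => d.insert a (f.getD a "")) PySem.Dict.empty).insert k v
          else values.foldl (fun d a => d.insert a (f.getD a "")) PySem.Dict.empty) := by
  simp only [PySem.Dict.getD_insert]
  by_cases hk : k ∈ values
  · rw [if_pos hk]; exact foldl_insert_fun_overwrite values _ k v hk
  · rw [if_neg hk]
    apply PySem.List.foldl_congr_mem
    intro acc x hx
    have : ¬ x = k := fun h => hk (h ▸ hx)
    simp [this]

-- main invariant: selecting from the fully built dict = A's filtered pass, for any start dict f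
lemma sel_foldl_full (values : List String) :
    ∀ (L : List String) (f : PySem.Dict String String),
      (∀ kv ∈ L, ((PySem.Str.splitMax? (PySem.Str.lstrip kv) " " 1).getD []).length = 2) →
      values.foldl
        (fun d a => d.insert a ((L.foldl
          (fun f kv =>
            match PySem.Str.splitMax? (PySem.Str.lstrip kv) " " 1 with
            | some [k, v] => f.insert (pyCleanA k) v
            | _ => f) f).getD a "")) PySem.Dict.empty
      = L.foldl
          (fun d kv =>
            match PySem.Str.splitMax? (PySem.Str.lstrip kv) " " 1 with
            | some [k, v] =>
                let k := pyCleanA k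
                if k ∈ values then d.insert k v else d
            | _ => d)
          (values.foldl (fun d a => d.insert a (f.getD a "")) PySem.Dict.empty) := by
  intro L
  induction L with
  | nil => intro f _; simp
  | cons kv t ih =>
      intro f h
      have hkv := h kv (List.mem_cons_self ..)
      obtain ⟨k0, v0, hsp⟩ :
          ∃ k0 v0, PySem.Str.splitMax? (PySem.Str.lstrip kv) " " 1 = some [k0, v0] := by
        cases hs : PySem.Str.splitMax? (PySem.Str.lstrip kv) " " 1 with
        | none => rw [hs] at hkv; simp at hkv
        | some l =>
            rw [hs] at hkv; simp at hkv
            match l, hkv with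
            | [k0, v0], _ => exact ⟨k0, v0, rfl⟩
      simp only [List.foldl_cons, hsp]
      rw [ih (f.insert (pyCleanA k0) v0) (fun x hx => h x (List.mem_cons_of_mem _ hx)),
          sel_insert]

-- every entry of L splits into exactly a key and a value
def AllSplit (L : List String) : Prop :=
  ∀ kv ∈ L, ((PySem.Str.splitMax? (PySem.Str.lstrip kv) " " 1).getD []).length = 2

lemma allSplit_shape {kv : String} (h : ((PySem.Str.splitMax? (PySem.Str.lstrip kv) " " 1).getD []).length = 2) :
    ∃ k0 v0, PySem.Str.splitMax? (PySem.Str.lstrip kv) " " 1 = some [k0, v0] := by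
  cases hs : PySem.Str.splitMax? (PySem.Str.lstrip kv) " " 1 with
  | none => rw [hs] at h; simp at h
  | some l =>
      rw [hs] at h; simp at h
      match l, h with
      | [k0, v0], _ => exact ⟨k0, v0, rfl⟩

-- B's pair-accumulating pass = flatMap of the per-entry contributions
lemma pairs_eq_flatMap :
    ∀ (L : List String) (ps : List (String × String)), AllSplit L →
      L.foldl
        (fun ps kv =>
          match PySem.Str.splitMax? (PySem.Str.lstrip kv) " " 1 with
          | none => ps
          | some l =>
            match l with
            | [] => ps
            | k :: rest =>
              match rest with
              | [] => ps
              | v :: _ => ps ++ [(pyCleanB k, v)]) ps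
      = ps ++ L.flatMap gPair := by
  intro L
  induction L with
  | nil => intro ps _; simp
  | cons kv t ih =>
      intro ps h
      obtain ⟨k0, v0, hsp⟩ := allSplit_shape (h kv (List.mem_cons_self ..))
      simp only [List.foldl_cons, List.flatMap_cons, gPair, hsp]
      rw [ih _ (fun x hx => h x (List.mem_cons_of_mem _ hx)), List.append_assoc]

-- the A-shaped full-dict pass = inserting the flatMap pairs in order
lemma full_eq_insert_flatMap :
    ∀ (L : List String) (f : PySem.Dict String String), AllSplit L →
      L.foldl
        (fun f kv =>
          match PySem.Str.splitMax? (PySem.Str.lstrip kv) " " 1 with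
          | some [k, v] => f.insert (pyCleanA k) v
          | _ => f) f
      = (L.flatMap gPair).foldl (fun d p => d.insert p.1 p.2) f := by
  intro L
  induction L with
  | nil => intro f _; simp
  | cons kv t ih =>
      intro f h
      obtain ⟨k0, v0, hsp⟩ := allSplit_shape (h kv (List.mem_cons_self ..))
      simp only [List.foldl_cons, List.flatMap_cons, gPair, hsp, List.foldl_append]
      exact ih _ (fun x hx => h x (List.mem_cons_of_mem _ hx))

-- lookup in the inserted-pairs dict = backwards scan for the last occurrence
lemma getD_insert_pairs_eq_lastScan (ps : List (String × String)) (a : String) :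
    (ps.foldl (fun d p => d.insert p.1 p.2) PySem.Dict.empty).getD a ""
      = lastScanB ps.reverse a := by
  induction ps using List.reverseRecOn with
  | nil => simp [lastScanB, PySem.Dict.getD_empty]
  | append_singleton ps p ih =>
      obtain ⟨k, v⟩ := p
      rw [List.foldl_append]
      simp only [List.foldl_cons, List.foldl_nil, PySem.Dict.getD_insert,
        List.reverse_append, List.reverse_cons, List.reverse_nil, List.nil_append,
        List.cons_append, lastScanB]
      by_cases hak : a = k
      · simp [hak]
      · have hka : k ≠ a := fun h => hak (Eq.symm h)
        simp [hak, hka, ih]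

-- the Python A strips with .lstrip().rstrip(); B strips with .strip(): the same string
lemma rstrip_lstrip_eq_strip (s : String) :
    PySem.Str.rstrip (PySem.Str.lstrip s) = PySem.Str.strip s := by
  simp [PySem.Str.rstrip, PySem.Str.lstrip, PySem.Str.strip, PySem.Chars.strip]

-- the initial metadata dict is the selection from the empty full dict
lemma metadata_init (values : List String) :
    values.foldl (fun d a => d.insert a "") PySem.Dict.empty
      = values.foldl (fun d a => d.insert a (PySem.Dict.empty.getD a "")) PySem.Dict.empty := by
  simp [PySem.Dict.getD_empty]

-- ===== VERDICT (by name: the statement is the Claim_ definition above) =====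
theorem extract_9th_column_information_spec : Claim_equal_extract_9th_column_information := by
  intro line values _hdom hpre
  unfold Spec_extract_9th_column_information
  unfold Pre_extract_9th_column_information at hpre
  unfold extract_9th_column_information extract_9th_column_information_alt
  have hAB : rstripSemisA = rstripSemisB := rfl
  have hPB : rstripSemisPre = rstripSemisB := rfl
  rw [hPB] at hpre
  simp only [rstrip_lstrip_eq_strip, hAB]
  rw [metadata_init, ← sel_foldl_full values _ PySem.Dict.empty hpre]
  refine congrArg PySem.Dict.items ?_
  apply PySem.List.foldl_congr_mem
  intro acc a _
  rw [pairs_eq_flatMap _ _ hpre, List.nil_append, ← getD_insert_pairs_eq_lastScan,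
      ← full_eq_insert_flatMap _ _ hpre]
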